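-- pv_equiv track=rewrite | github.com/kimcuong2407/god-vps | index.py | count_consecutive_losses
-- ===== SOURCE A (Python) =====
-- def count_consecutive_losses(results):
--     consecutive_losses = {'1': 0, '2': 0, '3': 0, '4': 0, 'extra':0}
--     current_streak = 0
--     for i in range(len(results)):
--         if results[i] == 2:
--             current_streak += 1
--             if current_streak <= 4 and i < len(results) - 1 and results[i + 1] == 1:
--                 consecutive_losses[str(current_streak)] += 1
--             elif current_streak >4 and i < len(results) - 1 and results[i + 1] == 1:
--                 consecutive_losses['extra'] +=1
--         else:
--             current_streak = 0
--     return consecutive_losses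
-- ===== SOURCE B (Python) =====
-- def count_consecutive_losses(results):
--     # Segment into maximal runs, then count each loss-run (value 2) that is
--     # immediately followed by a win-run (value 1), bucketed by run length.
--     runs = []
--     for x in results:
--         if runs and runs[-1][0] == x:
--             runs[-1][1] += 1
--         else:
--             runs.append([x, 1])
--     consecutive_losses = {'1': 0, '2': 0, '3': 0, '4': 0, 'extra': 0}
--     for (v, n), (w, _) in zip(runs, runs[1:]):
--         if v == 2 and w == 1:
--             consecutive_losses[str(n) if n <= 4 else 'extra'] += 1
--     return consecutive_losses
-- ===== Notes on version B (the rewrite author's own statement) =====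
-- stated objective: alternative
-- what changed: B first segments results into maximal (value, length) runs and then counts each 2-run whose next run has value 1, replacing A's single index loop with streak counter and results[i+1] lookahead.
import Mathlib
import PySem

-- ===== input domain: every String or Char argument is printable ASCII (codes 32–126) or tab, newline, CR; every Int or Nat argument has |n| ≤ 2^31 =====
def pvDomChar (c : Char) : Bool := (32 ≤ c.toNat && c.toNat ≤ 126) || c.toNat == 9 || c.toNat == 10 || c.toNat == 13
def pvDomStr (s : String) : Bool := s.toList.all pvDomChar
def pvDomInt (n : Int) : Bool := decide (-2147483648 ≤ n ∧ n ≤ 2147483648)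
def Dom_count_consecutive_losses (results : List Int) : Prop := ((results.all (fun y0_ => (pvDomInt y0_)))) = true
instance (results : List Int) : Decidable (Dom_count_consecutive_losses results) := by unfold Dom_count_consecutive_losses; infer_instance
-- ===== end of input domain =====

-- B re-implements the count by first segmenting results into maximal runs and then
-- scanning adjacent run pairs (a value-2 run followed by a value-1 run), instead of
-- A's index loop with one-element lookahead; same O(n) cost, different decomposition.


-- ===== PORT A =====
-- literal port of A: index loop over range(len(results)), streak counter, lookahead results[i+1]
def count_consecutive_losses (results : List Int) : List (String × Int) :=
  let st := (List.range results.length).foldl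
    (fun (st : PySem.Dict String Int × Int) (i : Nat) =>
      if PySem.List.pyGetD results (i : Int) 0 = 2 then
        let cur := st.2 + 1
        if cur ≤ 4 ∧ (i : Int) < (results.length : Int) - 1 ∧ PySem.List.pyGetD results ((i : Int) + 1) 0 = 1 then
          (st.1.modify (PySem.Int.toStr cur) 0 (· + 1), cur)
        else if 4 < cur ∧ (i : Int) < (results.length : Int) - 1 ∧ PySem.List.pyGetD results ((i : Int) + 1) 0 = 1 then
          (st.1.modify "extra" 0 (· + 1), cur)
        else (st.1, cur)
      else (st.1, 0))
    (PySem.Dict.ofList [("1", 0), ("2", 0), ("3", 0), ("4", 0), ("extra", 0)], 0)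
  st.1.items

-- ===== PORT B =====
-- Source B builds the run list front-to-back, mutating the LAST run; the port keeps the
-- run list reversed (head = current run) and reverses at the end — same values, same traversal.
def pvRunsRev (results : List Int) : List (Int × Int) :=
  results.foldl
    (fun acc x =>
      match acc with
      | (v, n) :: rest => if v = x then (v, n + 1) :: rest else (x, 1) :: (v, n) :: rest
      | [] => [(x, 1)])
    []

def count_consecutive_losses_alt (results : List Int) : List (String × Int) :=
  let runs := (pvRunsRev results).reverse
  let d := (runs.zip runs.tail).foldl
    (fun (d : PySem.Dict String Int) pq =>
      if pq.1.1 = 2 ∧ pq.2.1 = 1 then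
        d.modify (if pq.1.2 ≤ 4 then PySem.Int.toStr pq.1.2 else "extra") 0 (· + 1)
      else d)
    (PySem.Dict.ofList [("1", 0), ("2", 0), ("3", 0), ("4", 0), ("extra", 0)])
  d.items

-- ===== PRECONDITION & SPEC =====
def Spec_count_consecutive_losses (results : List Int) (out : List (String × Int)) : Prop := out = count_consecutive_losses_alt results
instance (results : List Int) (out : List (String × Int)) : Decidable (Spec_count_consecutive_losses results out) := by unfold Spec_count_consecutive_losses; infer_instance

-- ===== CLAIM (what is proved, stated in full; the proofs are below) =====
def Claim_equal_count_consecutive_losses : Prop := ∀ (results : List Int), Dom_count_consecutive_losses results → Spec_count_consecutive_losses results (count_consecutive_losses results)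

-- ===== LEMMAS AND PROOFS =====

-- the single bucket increment both programs perform, keyed by a streak length
def pvIncr (d : PySem.Dict String Int) (n : Int) : PySem.Dict String Int :=
  d.modify (if n ≤ 4 then PySem.Int.toStr n else "extra") 0 (· + 1)

-- the streak lengths A counts, in order: emitted at a 2 whose successor is 1
def pvLens : Int → List Int → List Int
  | _, [] => []
  | s, x :: rest =>
    if x = 2 then
      if rest.head? = some 1 then (s + 1) :: pvLens (s + 1) rest else pvLens (s + 1) rest
    else pvLens 0 rest

-- the streak lengths B counts, in order: a 2-run immediately followed by a 1-run
def pvLens2 : List (Int × Int) → List Int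
  | (v, n) :: (w, m) :: rest =>
    if v = 2 ∧ w = 1 then n :: pvLens2 ((w, m) :: rest) else pvLens2 ((w, m) :: rest)
  | _ => []

-- forward groupby, left recursion with an open run accumulator
def pvGrpAux (v : Int) (n : Int) : List Int → List (Int × Int)
  | [] => [(v, n)]
  | x :: xs => if x = v then pvGrpAux v (n + 1) xs else (v, n) :: pvGrpAux x 1 xs

-- pure recursion mirroring A's loop body on the remaining suffix (lookahead = head?)
def pvARec : List Int → (PySem.Dict String Int × Int) → (PySem.Dict String Int × Int)
  | [], st => st
  | x :: rest, st =>
    if x = 2 then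
      let cur := st.2 + 1
      if cur ≤ 4 ∧ rest.head? = some 1 then
        pvARec rest (st.1.modify (PySem.Int.toStr cur) 0 (· + 1), cur)
      else if 4 < cur ∧ rest.head? = some 1 then
        pvARec rest (st.1.modify "extra" 0 (· + 1), cur)
      else pvARec rest (st.1, cur)
    else pvARec rest (st.1, 0)

theorem pvA_range' (L : List Int) : ∀ (ys : List Int) (k : Nat) (st : PySem.Dict String Int × Int),
    L.drop k = ys →
    (List.range' k ys.length).foldl
      (fun (st : PySem.Dict String Int × Int) (i : Nat) =>
        if PySem.List.pyGetD L (i : Int) 0 = 2 then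
          let cur := st.2 + 1
          if cur ≤ 4 ∧ (i : Int) < (L.length : Int) - 1 ∧ PySem.List.pyGetD L ((i : Int) + 1) 0 = 1 then
            (st.1.modify (PySem.Int.toStr cur) 0 (· + 1), cur)
          else if 4 < cur ∧ (i : Int) < (L.length : Int) - 1 ∧ PySem.List.pyGetD L ((i : Int) + 1) 0 = 1 then
            (st.1.modify "extra" 0 (· + 1), cur)
          else (st.1, cur)
        else (st.1, 0)) st
    = pvARec ys st := by
  intro ys
  induction ys with
  | nil => intro k st _; simp [pvARec]
  | cons x rest ih =>
    intro k st hdrop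
    have hk : k < L.length := by
      by_contra h
      simp [List.drop_eq_nil_of_le (Nat.le_of_not_lt h)] at hdrop
    have h2 : L[k] :: L.drop (k+1) = x :: rest := by
      rw [List.getElem_cons_drop hk]; exact hdrop
    have hx0 : L[k] = x := by injection h2
    have hrest : L.drop (k+1) = rest := by injection h2
    have hx : L.getD k 0 = x := by
      rw [List.getD_eq_getElem?_getD, List.getElem?_eq_getElem hk]; simpa using hx0
    have hget : PySem.List.pyGetD L (k : Int) 0 = x := by
      rw [PySem.List.pyGetD_natCast]; exact hx
    have hlook : ((k : Int) < (L.length : Int) - 1 ∧ PySem.List.pyGetD L ((k : Int) + 1) 0 = 1)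
        ↔ rest.head? = some 1 := by
      constructor
      · rintro ⟨h1, hg⟩
        have hk1 : k + 1 < L.length := by omega
        have hv : PySem.List.pyGetD L ((k+1 : Nat) : Int) 0 = 1 := by push_cast; exact_mod_cast hg
        rw [PySem.List.pyGetD_natCast, List.getD_eq_getElem?_getD, List.getElem?_eq_getElem hk1] at hv
        simp only [Option.getD_some] at hv
        rw [← hrest, List.head?_drop]
        simp [List.getElem?_eq_getElem hk1, hv]
      · intro h
        rw [← hrest, List.head?_drop] at h
        have hk1 : k + 1 < L.length := by
          by_contra hc
          rw [List.getElem?_eq_none (by omega)] at h; simp at h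
        rw [List.getElem?_eq_getElem hk1] at h
        refine ⟨by omega, ?_⟩
        have hv : PySem.List.pyGetD L ((k+1 : Nat) : Int) 0 = 1 := by
          rw [PySem.List.pyGetD_natCast, List.getD_eq_getElem?_getD, List.getElem?_eq_getElem hk1]
          simpa using h
        push_cast at hv; exact_mod_cast hv
    rw [show (x :: rest).length = rest.length + 1 from rfl, List.range'_succ, List.foldl_cons,
        ih (k+1) _ hrest]
    simp only [pvARec, hget, hlook]
    split_ifs <;> rfl

theorem pvARec_fst : ∀ (ys : List Int) (d : PySem.Dict String Int) (s : Int),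
    (pvARec ys (d, s)).1 = List.foldl pvIncr d (pvLens s ys) := by
  intro ys
  induction ys with
  | nil => intro d s; simp [pvARec, pvLens]
  | cons x rest ih =>
    intro d s
    simp only [pvARec, pvLens]
    by_cases h2 : x = 2
    · simp only [h2, if_true]
      by_cases hh : rest.head? = some (1 : Int)
      · simp only [hh, if_true, and_true]
        by_cases hle : s + 1 ≤ 4
        · simp [hle, ih, pvIncr]
        · simp [hle, (by omega : 4 < s + 1), ih, pvIncr]
      · simp [hh, ih]
    · simp [h2, ih]

theorem pvRunsRev_grpAux : ∀ (xs : List Int) (v n : Int) (acc : List (Int × Int)),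
    xs.foldl
      (fun acc x =>
        match acc with
        | (v, n) :: rest => if v = x then (v, n + 1) :: rest else (x, 1) :: (v, n) :: rest
        | [] => [(x, 1)])
      ((v, n) :: acc)
    = (pvGrpAux v n xs).reverse ++ acc := by
  intro xs
  induction xs with
  | nil => intro v n acc; simp [pvGrpAux]
  | cons x rest ih =>
    intro v n acc
    rw [List.foldl_cons]
    show rest.foldl _ (if v = x then (v, n + 1) :: acc else (x, 1) :: (v, n) :: acc) = _
    rw [pvGrpAux]
    by_cases h : v = x
    · rw [if_pos h, ih, if_pos h.symm]
    · rw [if_neg h, ih, if_neg (fun hc => h hc.symm)]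
      simp

theorem pvGrpAux_head : ∀ (xs : List Int) (v n : Int), ∃ m t, pvGrpAux v n xs = (v, m) :: t := by
  intro xs
  induction xs with
  | nil => intro v n; exact ⟨n, [], rfl⟩
  | cons x rest ih =>
    intro v n
    by_cases h : x = v
    · obtain ⟨m, t, ht⟩ := ih v (n + 1)
      exact ⟨m, t, by simp [pvGrpAux, h, ht]⟩
    · exact ⟨n, pvGrpAux x 1 rest, by simp [pvGrpAux, h]⟩

theorem pvLens2_grpAux : ∀ (xs : List Int) (v n : Int),
    pvLens2 (pvGrpAux v n xs)
    = (if v = 2 ∧ xs.head? = some 1 then [n] else []) ++ pvLens (if v = 2 then n else 0) xs := by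
  intro xs
  induction xs with
  | nil => intro v n; simp [pvGrpAux, pvLens2, pvLens]
  | cons x rest ih =>
    intro v n
    simp only [pvGrpAux]
    by_cases h : x = v
    · subst h
      simp only []
      by_cases h2 : x = 2
      · subst h2
        simp only [pvLens, if_pos rfl]
        by_cases hr : rest.head? = some (1 : Int) <;> simp [hr, ih]
      · simp [pvLens, h2, ih]
    · simp only [if_neg h]
      obtain ⟨m, t, ht⟩ := pvGrpAux_head rest x 1
      rw [ht]
      simp only [pvLens2]
      rw [← ht, ih]
      by_cases hx2 : x = 2
      · subst hx2
        have hv2 : v ≠ 2 := fun hc => h hc.symm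
        have hc : ¬ (v = 2 ∧ (2 : Int) = 1) := by simp [hv2]
        simp only [hc, if_false, List.head?_cons]
        simp only [pvLens]
        by_cases hr : rest.head? = some (1 : Int) <;> simp [hr, hv2]
      · simp only [pvLens, hx2, if_false]
        by_cases hc : v = 2 ∧ x = 1 <;> simp [hc]

theorem pvB_fold : ∀ (rs : List (Int × Int)) (d : PySem.Dict String Int),
    (rs.zip rs.tail).foldl
      (fun (d : PySem.Dict String Int) pq =>
        if pq.1.1 = 2 ∧ pq.2.1 = 1 then
          d.modify (if pq.1.2 ≤ 4 then PySem.Int.toStr pq.1.2 else "extra") 0 (· + 1)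
        else d) d
    = List.foldl pvIncr d (pvLens2 rs) := by
  intro rs
  induction rs with
  | nil => intro d; simp [pvLens2]
  | cons p rest ih =>
    intro d
    match rest with
    | [] => simp [pvLens2]
    | q :: rest' =>
      obtain ⟨v, n⟩ := p
      obtain ⟨w, m⟩ := q
      simp only [List.tail_cons] at ih
      simp only [List.tail_cons, List.zip_cons_cons, List.foldl_cons, pvLens2]
      by_cases h : v = 2 ∧ w = 1
      · simp only [if_pos h, List.foldl_cons]
        rw [ih]
        simp [pvIncr]
      · simp only [if_neg h]
        rw [ih]

theorem pvTop : ∀ (L : List Int), pvLens2 ((pvRunsRev L).reverse) = pvLens 0 L := by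
  intro L
  match L with
  | [] => simp [pvRunsRev, pvLens2, pvLens]
  | x :: xs =>
    have h1 : (pvRunsRev (x :: xs)).reverse = pvGrpAux x 1 xs := by
      simp only [pvRunsRev, List.foldl_cons]
      rw [show (List.foldl _ [(x, 1)] xs : List (Int × Int))
            = xs.foldl _ ((x, 1) :: []) from rfl, pvRunsRev_grpAux]
      simp
    rw [h1, pvLens2_grpAux]
    simp only [pvLens, List.head?_cons]
    by_cases h2 : x = 2
    · simp only [h2, true_and]
      by_cases hr : xs.head? = some (1 : Int) <;> simp [hr]
    · simp [h2]

-- ===== VERDICT (by name: the statement is the Claim_ definition above) =====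
theorem count_consecutive_losses_spec : Claim_equal_count_consecutive_losses := by
  intro results _
  show count_consecutive_losses results = count_consecutive_losses_alt results
  simp only [count_consecutive_losses, count_consecutive_losses_alt]
  rw [List.range_eq_range', pvA_range' results results 0 _ rfl, pvARec_fst, pvB_fold, pvTop]
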